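-- pv_equiv track=rewrite | github.com/kaifaust/octohedra | Octoflake/analysis/sandbox/TrainSeats.py | bruteForceSeatingGenerator
-- ===== SOURCE A (Python) =====
-- def bruteForceSeatingGenerator(n):
--     # Seats start unoccupied
--     seats = [False] * n
--     for _ in range(n):
--         best_seat = -1
--
--         # (distance to closest occupied seat, size of gap)
--         best_distance = (
--             -1,
--             -1,
--         )
--
--         for potential_seat in range(n):
--
--             # If someone is already sitting in the potential_seat, move on
--             if seats[potential_seat]:
--                 continue
--
--             left, right = potential_seat, potential_seat
--
--             # Scan left until we hit an occupied seat or the end of the train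
--             while left >= 0 and not seats[left]:
--                 left -= 1
--
--             # Scan right until we hit an occupied seat of the end of the train
--             while right < n and not seats[right]:
--                 right += 1
--
--             empty_left = potential_seat - left - 1
--             empty_right = right - potential_seat - 1
--
--             # (distance to closest occupied seat, size of gap)
--             distance = (min(empty_left, empty_right), empty_left + empty_right)
--
--             # Don't replace if there is a lower index seat with this distance
--             if (distance > best_distance):
--                 best_seat, best_distance = potential_seat, distance
--         seats[best_seat] = True
--         yield best_seat
-- ===== SOURCE B (Python) =====
-- def bruteForceSeatingGenerator(n):
--     # Maintain the maximal runs of empty seats as a sorted list of inclusive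
--     # intervals; each step pick the leftmost longest run, seat at its midpoint,
--     # and split the run.  O(n) per step instead of A's O(n^2) seat-and-scan pass.
--     gaps = [(0, n - 1)] if n > 0 else []
--     for _ in range(n):
--         best = 0
--         for i in range(1, len(gaps)):
--             if gaps[i][1] - gaps[i][0] > gaps[best][1] - gaps[best][0]:
--                 best = i
--         a, b = gaps[best]
--         p = a + (b - a) // 2
--         yield p
--         mid = []
--         if a <= p - 1:
--             mid.append((a, p - 1))
--         if p + 1 <= b:
--             mid.append((p + 1, b))
--         gaps = gaps[:best] + mid + gaps[best + 1:]
-- ===== Notes on version B (the rewrite author's own statement) =====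
-- stated objective: alternative
-- what changed: Instead of re-scanning every seat and walking left/right to the nearest occupied seat each round (A), B maintains the sorted list of maximal empty intervals, each round picks the leftmost longest interval, seats at its midpoint and splits it in two.
import Mathlib
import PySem

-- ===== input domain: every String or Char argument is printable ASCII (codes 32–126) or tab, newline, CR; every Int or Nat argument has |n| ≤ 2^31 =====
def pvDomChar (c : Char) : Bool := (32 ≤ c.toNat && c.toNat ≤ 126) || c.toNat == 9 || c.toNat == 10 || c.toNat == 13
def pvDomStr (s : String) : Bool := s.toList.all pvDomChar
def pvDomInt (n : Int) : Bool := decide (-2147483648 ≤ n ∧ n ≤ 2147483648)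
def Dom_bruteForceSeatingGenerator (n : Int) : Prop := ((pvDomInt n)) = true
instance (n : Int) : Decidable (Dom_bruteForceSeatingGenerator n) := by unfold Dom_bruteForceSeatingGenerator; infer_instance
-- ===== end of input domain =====

-- B replaces A's seat-by-seat scan (with inner left/right scans) by a sorted list of
-- empty-gap intervals, picking the leftmost longest gap and splitting it at its midpoint
-- (a different algorithm over a different data structure; objective: alternative).

-- ===== PORT A =====
def pvGetB (seats : List Bool) (i : Int) : Bool := (PySem.List.pyGet? seats i).getD true

-- 'while left >= 0 and not seats[left]: left -= 1'
def pvScanL (seats : List Bool) (left : Int) : Int :=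
  if h : 0 ≤ left ∧ pvGetB seats left = false then pvScanL seats (left - 1) else left
termination_by (left + 1).toNat
decreasing_by omega

-- 'while right < n and not seats[right]: right += 1'
def pvScanR (seats : List Bool) (n right : Int) : Int :=
  if h : right < n ∧ pvGetB seats right = false then pvScanR seats n (right + 1) else right
termination_by (n - right).toNat
decreasing_by omega

-- Python tuple '>' on int pairs
def pvTupGt (x y : Int × Int) : Bool := decide (y.1 < x.1 ∨ (y.1 = x.1 ∧ y.2 < x.2))

def pvInnerStep (seats : List Bool) (n : Int) (best : Int × (Int × Int)) (p : Int) :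
    Int × (Int × Int) :=
  if pvGetB seats p then best
  else
    let left := pvScanL seats p
    let right := pvScanR seats n p
    let el := p - left - 1
    let er := right - p - 1
    let dist := (min el er, el + er)
    if pvTupGt dist best.2 then (p, dist) else best

def pvAStep (n : Int) (st : List Bool × List Int) : List Bool × List Int :=
  let r := (PySem.List.pyRange 0 n 1).foldl (pvInnerStep st.1 n) (-1, (-1, -1))
  (PySem.List.pySetD st.1 r.1 true, st.2 ++ [r.1])

def bruteForceSeatingGenerator (n : Int) : List Int :=
  ((PySem.List.pyRange 0 n 1).foldl (fun st _ => pvAStep n st)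
    (List.replicate n.toNat false, [])).2

-- ===== PORT B =====
def pvGapLen (g : Int × Int) : Int := g.2 - g.1

def pvBestIdx (gaps : List (Int × Int)) : Int :=
  (PySem.List.pyRange 1 (gaps.length : Int) 1).foldl
    (fun best i =>
      if pvGapLen (PySem.List.pyGetD gaps i (0, 0)) >
          pvGapLen (PySem.List.pyGetD gaps best (0, 0)) then i else best) 0

def pvBStep (st : List (Int × Int) × List Int) : List (Int × Int) × List Int :=
  let gaps := st.1
  let best := pvBestIdx gaps
  let g := PySem.List.pyGetD gaps best (0, 0)
  let p := g.1 + PySem.Int.floordiv (g.2 - g.1) 2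
  let mid := (if g.1 ≤ p - 1 then [(g.1, p - 1)] else []) ++
             (if p + 1 ≤ g.2 then [(p + 1, g.2)] else [])
  (PySem.List.slice gaps none (some best) ++ mid ++ PySem.List.slice gaps (some (best + 1)) none,
   st.2 ++ [p])

def bruteForceSeatingGenerator_alt (n : Int) : List Int :=
  ((PySem.List.pyRange 0 n 1).foldl (fun st _ => pvBStep st)
    ((if 0 < n then [(0, n - 1)] else []), [])).2

-- ===== PRECONDITION & SPEC =====
def Spec_bruteForceSeatingGenerator (n : Int) (out : List Int) : Prop := out = bruteForceSeatingGenerator_alt n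
instance (n : Int) (out : List Int) : Decidable (Spec_bruteForceSeatingGenerator n out) := by unfold Spec_bruteForceSeatingGenerator; infer_instance

-- ===== CLAIM (what is proved, stated in full; the proofs are below) =====
def Claim_equal_bruteForceSeatingGenerator : Prop := ∀ (n : Int), Dom_bruteForceSeatingGenerator n → Spec_bruteForceSeatingGenerator n (bruteForceSeatingGenerator n)

-- ===== LEMMAS AND PROOFS =====

-- ---- generic "first argmax" fold ----
def pvArgStep {α β : Type} [LinearOrder β] (k : α → β) (acc x : α) : α :=
  if k acc < k x then x else acc

def pvArgSpec {α β : Type} [LinearOrder β] (k : α → β) (l : List α) (init r : α) : Prop :=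
  (r = init ∧ ∀ x ∈ l, ¬ k init < k x) ∨
  (∃ l₁ l₂, l = l₁ ++ r :: l₂ ∧ k init < k r ∧
    (∀ x ∈ l₁, k x < k r) ∧ (∀ x ∈ l₂, ¬ k r < k x))

theorem pvArg_spec {α β : Type} [LinearOrder β] (k : α → β) (l : List α) (init : α) :
    pvArgSpec k l init (l.foldl (pvArgStep k) init) := by
  induction l generalizing init with
  | nil => exact Or.inl ⟨rfl, by simp⟩
  | cons x t ih =>
    simp only [List.foldl_cons]
    by_cases h : k init < k x
    · rw [show pvArgStep k init x = x from by simp [pvArgStep, h]]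
      rcases ih x with ⟨hr, hall⟩ | ⟨l₁, l₂, hsp, hlt, hbef, haft⟩
      · refine Or.inr ⟨[], t, by simp [hr], by rw [hr]; exact h, by simp, ?_⟩
        intro y hy; rw [hr]; exact hall y hy
      · refine Or.inr ⟨x :: l₁, l₂, by rw [List.cons_append, ← hsp], lt_trans h hlt, ?_, haft⟩
        intro y hy
        rcases List.mem_cons.mp hy with rfl | hy'
        · exact hlt
        · exact hbef y hy'
    · rw [show pvArgStep k init x = init from by simp [pvArgStep, h]]
      rcases ih init with ⟨hr, hall⟩ | ⟨l₁, l₂, hsp, hlt, hbef, haft⟩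
      · refine Or.inl ⟨hr, ?_⟩
        intro y hy
        rcases List.mem_cons.mp hy with rfl | hy'
        · exact h
        · exact hall y hy'
      · refine Or.inr ⟨x :: l₁, l₂, by rw [List.cons_append, ← hsp], hlt, ?_, haft⟩
        intro y hy
        rcases List.mem_cons.mp hy with rfl | hy'
        · exact lt_of_le_of_lt (le_of_not_gt h) hlt
        · exact hbef y hy'

theorem pvArg_unique {α β : Type} [LinearOrder β] (k : α → β) (l : List α) (init r r' : α)
    (h : pvArgSpec k l init r) (h' : pvArgSpec k l init r') : r = r' := by
  rcases h with ⟨hr, hall⟩ | ⟨l₁, l₂, hsp, hlt, hbef, haft⟩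
  · rcases h' with ⟨hr', _⟩ | ⟨l₁', l₂', hsp', hlt', _, _⟩
    · rw [hr, hr']
    · exact absurd hlt' (hall r' (by rw [hsp']; simp))
  · rcases h' with ⟨hr', hall'⟩ | ⟨l₁', l₂', hsp', hlt', hbef', haft'⟩
    · exact absurd hlt (hall' r (by rw [hsp]; simp))
    · have heq : l₁ ++ r :: l₂ = l₁' ++ r' :: l₂' := by rw [← hsp, ← hsp']
      rcases List.append_eq_append_iff.mp heq with ⟨a', hc, hb⟩ | ⟨c', hc, hb⟩
      · cases a' with
        | nil => exact ((by simpa using hb : r = r' ∧ l₂ = l₂')).1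
        | cons z a'' =>
          exfalso
          have hz : r = z ∧ l₂ = a'' ++ r' :: l₂' := by
            constructor
            · exact (List.cons_eq_cons.mp hb).1
            · exact (List.cons_eq_cons.mp hb).2
          have hrmem : r ∈ l₁' := by rw [hc, hz.1]; simp
          have hr'mem : r' ∈ l₂ := by rw [hz.2]; simp
          exact haft r' hr'mem (hbef' r hrmem)
      · cases c' with
        | nil => exact ((by simpa using hb : r' = r ∧ l₂' = l₂)).1.symm
        | cons z c'' =>
          exfalso
          have hz : r' = z ∧ l₂' = c'' ++ r :: l₂ := by
            constructor
            · exact (List.cons_eq_cons.mp hb).1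
            · exact (List.cons_eq_cons.mp hb).2
          have hrmem : r' ∈ l₁ := by rw [hc, hz.1]; simp
          have hr'mem : r ∈ l₂' := by rw [hz.2]; simp
          exact haft' r hr'mem (hbef r' hrmem)

-- ---- the gap invariant relating A's seat list to B's interval list ----
def IsRuns (s : List Bool) (gs : List (Int × Int)) : Prop :=
  (∀ g ∈ gs, 0 ≤ g.1 ∧ g.1 ≤ g.2 ∧ g.2 < (s.length : Int)) ∧
  (∀ g ∈ gs, ∀ i, g.1 ≤ i → i ≤ g.2 → pvGetB s i = false) ∧
  (∀ g ∈ gs, 0 < g.1 → pvGetB s (g.1 - 1) = true) ∧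
  (∀ g ∈ gs, g.2 + 1 < (s.length : Int) → pvGetB s (g.2 + 1) = true) ∧
  gs.Pairwise (fun g h => g.2 + 1 < h.1) ∧
  (∀ i : Int, 0 ≤ i → i < (s.length : Int) → pvGetB s i = false →
    ∃ g ∈ gs, g.1 ≤ i ∧ i ≤ g.2)

def pvSumLen (gs : List (Int × Int)) : Int := (gs.map (fun g => g.2 - g.1 + 1)).sum

def pvG (gs : List (Int × Int)) : Int × Int := gs.getD (pvBestIdx gs).toNat (0, 0)
def pvP (gs : List (Int × Int)) : Int := (pvG gs).1 + ((pvG gs).2 - (pvG gs).1) / 2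
def pvMid (gs : List (Int × Int)) : List (Int × Int) :=
  (if (pvG gs).1 ≤ pvP gs - 1 then [((pvG gs).1, pvP gs - 1)] else []) ++
  (if pvP gs + 1 ≤ (pvG gs).2 then [(pvP gs + 1, (pvG gs).2)] else [])
def pvNewGaps (gs : List (Int × Int)) : List (Int × Int) :=
  gs.take (pvBestIdx gs).toNat ++ pvMid gs ++ gs.drop ((pvBestIdx gs).toNat + 1)

-- key function for B's selection fold
def pvKeyB (gs : List (Int × Int)) (i : Int) : Int := pvGapLen (PySem.List.pyGetD gs i (0, 0))

-- distance tuple of a seat, read off from the interval list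
def pvDistOf (gs : List (Int × Int)) (p : Int) : Int × Int :=
  match gs.find? (fun g => decide (g.1 ≤ p ∧ p ≤ g.2)) with
  | some g => (min (p - g.1) (g.2 - p), g.2 - g.1)
  | none => (0, 0)

-- challenge body of A's inner loop (proof-side name for the else-branch)
def pvChal (s : List Bool) (n : Int) (acc : Int × (Int × Int)) (p : Int) : Int × (Int × Int) :=
  let left := pvScanL s p
  let right := pvScanR s n p
  let el := p - left - 1
  let er := right - p - 1
  let dist := (min el er, el + er)
  if pvTupGt dist acc.2 then (p, dist) else acc

-- ---- small bridges ----
theorem pvTupGt_iff (x y : Int × Int) : pvTupGt x y = true ↔ toLex y < toLex x := by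
  rw [pvTupGt, decide_eq_true_eq, Prod.Lex.lt_iff]
  rfl

theorem pvKeyB_nat (gs : List (Int × Int)) (i : Nat) (h : i < gs.length) :
    pvKeyB gs (i : Int) = pvGapLen gs[i] := by
  rw [pvKeyB, PySem.List.pyGetD_eq_getElem _ _ (by omega) (by exact_mod_cast h)]
  simp
theorem pvGetB_replicate (N : Nat) (i : Int) (h0 : 0 ≤ i) (h1 : i < (N : Int)) :
    pvGetB (List.replicate N false) i = false := by
  have ht : i.toNat < N := by omega
  rw [pvGetB, PySem.List.pyGet?_of_nonneg _ h0]
  simp [ht]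

theorem pvGetB_set (s : List Bool) (p i : Int) (hp0 : 0 ≤ p) (hp1 : p < (s.length : Int))
    (hi0 : 0 ≤ i) :
    pvGetB (PySem.List.pySetD s p true) i = if i = p then true else pvGetB s i := by
  rw [PySem.List.pySetD_of_nonneg _ _ hp0]
  rw [pvGetB, pvGetB, PySem.List.pyGet?_of_nonneg _ hi0, PySem.List.pyGet?_of_nonneg _ hi0]
  rw [List.getElem?_set]
  by_cases h : i = p
  · have h1 : p.toNat = i.toNat := by omega
    have h2 : i.toNat < s.length := by omega
    simp [h, h1, h2]
  · have h1 : ¬ p.toNat = i.toNat := by omega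
    simp [h, h1]

theorem pvBestIdx_spec (gs : List (Int × Int)) (hne : gs ≠ []) :
    0 ≤ pvBestIdx gs ∧ pvBestIdx gs < (gs.length : Int) ∧
    (∀ i : Int, 0 ≤ i → i < pvBestIdx gs → pvKeyB gs i < pvKeyB gs (pvBestIdx gs)) ∧
    (∀ i : Int, 0 ≤ i → i < (gs.length : Int) → pvKeyB gs i ≤ pvKeyB gs (pvBestIdx gs)) := by
  have hlen : 0 < gs.length := List.length_pos_iff.mpr hne
  have hstep : (fun (best i : Int) =>
      if pvGapLen (PySem.List.pyGetD gs i (0, 0)) >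
          pvGapLen (PySem.List.pyGetD gs best (0, 0)) then i else best)
      = pvArgStep (pvKeyB gs) := by
    funext acc x
    simp [pvArgStep, pvKeyB, gt_iff_lt]
  have hΦ : pvArgSpec (pvKeyB gs) (PySem.List.pyRange 1 (gs.length : Int) 1) 0 (pvBestIdx gs) := by
    rw [pvBestIdx, hstep]
    exact pvArg_spec _ _ _
  rcases hΦ with ⟨hr0, hall⟩ | ⟨l₁, l₂, hsp, hlt, hbef, haft⟩
  · rw [hr0]
    refine ⟨le_refl 0, by exact_mod_cast hlen, ?_, ?_⟩
    · intro i hi0 hi1; omega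
    · intro i hi0 hi2
      rcases lt_or_eq_of_le hi0 with hpos | hz
      · exact le_of_not_gt (hall i (PySem.List.mem_pyRange_one.mpr ⟨by omega, hi2⟩))
      · rw [← hz]
  · have hmem : pvBestIdx gs ∈ PySem.List.pyRange 1 (gs.length : Int) 1 := by
      rw [hsp]; simp
    have hb := PySem.List.mem_pyRange_one.mp hmem
    have hpw : (PySem.List.pyRange 1 (gs.length : Int) 1).Pairwise (· < ·) :=
      PySem.List.pairwise_lt_pyRange_one 1 (gs.length : Int)
    rw [hsp] at hpw
    have h12 := List.pairwise_append.mp hpw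
    have hbefpos : ∀ x ∈ l₁, x < pvBestIdx gs := fun x hx => h12.2.2 x hx _ List.mem_cons_self
    have haftpos : ∀ y ∈ l₂, pvBestIdx gs < y := (List.pairwise_cons.mp h12.2.1).1
    refine ⟨by omega, by omega, ?_, ?_⟩
    · intro i hi0 hi1
      rcases lt_or_eq_of_le hi0 with hpos | hz
      · have himem : i ∈ PySem.List.pyRange 1 (gs.length : Int) 1 :=
          PySem.List.mem_pyRange_one.mpr ⟨by omega, by omega⟩
        rw [hsp] at himem
        rcases List.mem_append.mp himem with hi | hi
        · exact hbef i hi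
        · rcases List.mem_cons.mp hi with rfl | hi'
          · omega
          · exact absurd (haftpos i hi') (by omega)
      · rw [← hz]; exact hlt
    · intro i hi0 hi2
      rcases lt_or_eq_of_le hi0 with hpos | hz
      · have himem : i ∈ PySem.List.pyRange 1 (gs.length : Int) 1 :=
          PySem.List.mem_pyRange_one.mpr ⟨by omega, hi2⟩
        rw [hsp] at himem
        rcases List.mem_append.mp himem with hi | hi
        · exact le_of_lt (hbef i hi)
        · rcases List.mem_cons.mp hi with rfl | hi'
          · exact le_refl _
          · exact le_of_not_gt (haft i hi')
      · rw [← hz]; exact le_of_lt hlt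

theorem pvScanL_eq (s : List Bool) (gs : List (Int × Int)) (hr : IsRuns s gs)
    (g : Int × Int) (hg : g ∈ gs) (p : Int) (h1 : g.1 ≤ p) (h2 : p ≤ g.2) :
    pvScanL s p = g.1 - 1 := by
  obtain ⟨hbd, hfalse, hleft, _, _, _⟩ := hr
  have hb := hbd g hg
  suffices H : ∀ m : Nat, ∀ p : Int, g.1 ≤ p → p ≤ g.2 → (p - g.1).toNat = m →
      pvScanL s p = g.1 - 1 from H _ p h1 h2 rfl
  intro m
  induction m with
  | zero =>
    intro p hp1 hp2 hm
    have hpg : p = g.1 := by omega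
    rw [pvScanL, dif_pos ⟨by omega, hfalse g hg p hp1 hp2⟩]
    have hcond : ¬ (0 ≤ p - 1 ∧ pvGetB s (p - 1) = false) := by
      rintro ⟨hge, hfal⟩
      have h01 : 0 < g.1 := by omega
      have := hleft g hg h01
      rw [hpg] at hfal
      simp [this] at hfal
    rw [pvScanL, dif_neg hcond]
    omega
  | succ m ih =>
    intro p hp1 hp2 hm
    rw [pvScanL, dif_pos ⟨by omega, hfalse g hg p hp1 hp2⟩]
    exact ih (p - 1) (by omega) (by omega) (by omega)

theorem pvScanR_eq (s : List Bool) (gs : List (Int × Int)) (n : Int) (hr : IsRuns s gs)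
    (hn : (s.length : Int) = n) (g : Int × Int) (hg : g ∈ gs) (p : Int)
    (h1 : g.1 ≤ p) (h2 : p ≤ g.2) :
    pvScanR s n p = g.2 + 1 := by
  obtain ⟨hbd, hfalse, _, hright, _, _⟩ := hr
  have hb := hbd g hg
  suffices H : ∀ m : Nat, ∀ p : Int, g.1 ≤ p → p ≤ g.2 → (g.2 - p).toNat = m →
      pvScanR s n p = g.2 + 1 from H _ p h1 h2 rfl
  intro m
  induction m with
  | zero =>
    intro p hp1 hp2 hm
    have hpg : p = g.2 := by omega
    rw [pvScanR, dif_pos ⟨by omega, hfalse g hg p hp1 hp2⟩]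
    have hcond : ¬ (p + 1 < n ∧ pvGetB s (p + 1) = false) := by
      rintro ⟨hge, hfal⟩
      have h01 : g.2 + 1 < (s.length : Int) := by omega
      have := hright g hg h01
      rw [hpg] at hfal
      simp [this] at hfal
    rw [pvScanR, dif_neg hcond]
    omega
  | succ m ih =>
    intro p hp1 hp2 hm
    rw [pvScanR, dif_pos ⟨by omega, hfalse g hg p hp1 hp2⟩]
    exact ih (p + 1) (by omega) (by omega) (by omega)

theorem pvDistOf_eq (gs : List (Int × Int)) (hpw : gs.Pairwise (fun g h => g.2 + 1 < h.1))
    (g : Int × Int) (hg : g ∈ gs) (p : Int) (h1 : g.1 ≤ p) (h2 : p ≤ g.2) :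
    pvDistOf gs p = (min (p - g.1) (g.2 - p), g.2 - g.1) := by
  induction gs with
  | nil => cases hg
  | cons g0 t ih =>
    rw [List.pairwise_cons] at hpw
    by_cases h0 : g0.1 ≤ p ∧ p ≤ g0.2
    · have hg0 : g = g0 := by
        rcases List.mem_cons.mp hg with rfl | hgt
        · rfl
        · have := hpw.1 g hgt
          omega
      subst hg0
      simp [pvDistOf, List.find?_cons_of_pos, h0]
    · have hgt : g ∈ t := by
        rcases List.mem_cons.mp hg with rfl | h
        · exact absurd ⟨h1, h2⟩ h0
        · exact h
      have : pvDistOf (g0 :: t) p = pvDistOf t p := by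
        simp [pvDistOf, List.find?_cons_of_neg, h0]
      rw [this]
      exact ih hpw.2 hgt

theorem pvFilter_eq (s : List Bool) (n : Int)
    (gs : List (Int × Int)) (lo : Int) (hlo : 0 ≤ lo)
    (hfst : ∀ g ∈ gs, lo ≤ g.1)
    (hbd : ∀ g ∈ gs, g.1 ≤ g.2 ∧ g.2 < n)
    (hfalse : ∀ g ∈ gs, ∀ i, g.1 ≤ i → i ≤ g.2 → pvGetB s i = false)
    (hpw : gs.Pairwise (fun g h => g.2 + 1 < h.1))
    (hcov : ∀ i, lo ≤ i → i < n → pvGetB s i = false → ∃ g ∈ gs, g.1 ≤ i ∧ i ≤ g.2) :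
    (PySem.List.pyRange lo n 1).filter (fun p => !pvGetB s p) =
      gs.flatMap (fun g => PySem.List.pyRange g.1 (g.2 + 1) 1) := by
  induction gs generalizing lo with
  | nil =>
    simp only [List.flatMap_nil]
    rw [List.filter_eq_nil_iff]
    intro p hp
    have hp' := PySem.List.mem_pyRange_one.mp hp
    by_contra hcon
    have hfal : pvGetB s p = false := by
      cases h : pvGetB s p
      · rfl
      · simp [h] at hcon
    rcases hcov p hp'.1 hp'.2 hfal with ⟨g, hg, _⟩
    cases hg
  | cons g t ih =>
    have hgbd := hbd g List.mem_cons_self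
    have hglo := hfst g List.mem_cons_self
    have hpw' := List.pairwise_cons.mp hpw
    rw [PySem.List.pyRange_one_append lo g.1 n hglo (by omega),
        PySem.List.pyRange_one_append g.1 (g.2 + 1) n (by omega) (by omega),
        List.filter_append, List.filter_append]
    have hseg1 : (PySem.List.pyRange lo g.1 1).filter (fun p => !pvGetB s p) = [] := by
      rw [List.filter_eq_nil_iff]
      intro p hp
      have hp' := PySem.List.mem_pyRange_one.mp hp
      by_contra hcon
      have hfal : pvGetB s p = false := by
        cases h : pvGetB s p
        · rfl
        · simp [h] at hcon
      rcases hcov p hp'.1 (by omega) hfal with ⟨g', hg', hcv⟩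
      rcases List.mem_cons.mp hg' with rfl | hg't
      · omega
      · have := hpw'.1 g' hg't
        omega
    have hseg2 : (PySem.List.pyRange g.1 (g.2 + 1) 1).filter (fun p => !pvGetB s p) =
        PySem.List.pyRange g.1 (g.2 + 1) 1 := by
      rw [List.filter_eq_self]
      intro p hp
      have hp' := PySem.List.mem_pyRange_one.mp hp
      rw [hfalse g List.mem_cons_self p hp'.1 (by omega)]
      rfl
    have hseg3 : (PySem.List.pyRange (g.2 + 1) n 1).filter (fun p => !pvGetB s p) =
        t.flatMap (fun g => PySem.List.pyRange g.1 (g.2 + 1) 1) := by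
      refine ih (g.2 + 1) (by omega) ?_ ?_ ?_ hpw'.2 ?_
      · intro g' hg'
        have := hpw'.1 g' hg'
        omega
      · intro g' hg'; exact hbd g' (List.mem_cons_of_mem _ hg')
      · intro g' hg'; exact hfalse g' (List.mem_cons_of_mem _ hg')
      · intro i hi1 hi2 hfal
        rcases hcov i (by omega) hi2 hfal with ⟨g', hg', hcv⟩
        rcases List.mem_cons.mp hg' with rfl | hg't
        · omega
        · exact ⟨g', hg't, hcv⟩
    rw [hseg1, hseg2, hseg3, List.flatMap_cons]
    simp

theorem pvInner_eq (n : Int) (s : List Bool) (gs : List (Int × Int))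
    (hr : IsRuns s gs) (hne : gs ≠ []) (hn : (s.length : Int) = n) :
    (PySem.List.pyRange 0 n 1).foldl (pvInnerStep s n) (-1, (-1, -1)) =
      (pvP gs, (min (pvP gs - (pvG gs).1) ((pvG gs).2 - pvP gs), (pvG gs).2 - (pvG gs).1)) := by
  obtain ⟨hb0, hb1, hE2, hE3⟩ := pvBestIdx_spec gs hne
  have hjlt : (pvBestIdx gs).toNat < gs.length := by omega
  have hG_get : gs[(pvBestIdx gs).toNat] = pvG gs := by
    rw [pvG, List.getD_eq_getElem?_getD, List.getElem?_eq_getElem hjlt, Option.getD_some]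
  have hGmem : pvG gs ∈ gs := by rw [← hG_get]; exact List.getElem_mem _
  have hGbd := hr.1 _ hGmem
  have hkbest : pvKeyB gs (pvBestIdx gs) = pvGapLen (pvG gs) := by
    rw [show pvBestIdx gs = (((pvBestIdx gs).toNat : Nat) : Int) by omega, pvKeyB_nat _ _ hjlt,
        hG_get]
  have hpa : (pvG gs).1 ≤ pvP gs ∧ pvP gs ≤ (pvG gs).2 ∧
      pvP gs - (pvG gs).1 = ((pvG gs).2 - (pvG gs).1) / 2 := by
    unfold pvP; omega
  -- Step 1: the inner loop skips occupied seats: fold over the filtered range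
  have hstep1 : pvInnerStep s n =
      fun acc p => if (!pvGetB s p) = true then pvChal s n acc p else acc := by
    funext acc p
    cases h : pvGetB s p <;> simp [pvInnerStep, pvChal, h]
  rw [hstep1, PySem.List.foldl_if_eq_foldl_filter]
  -- Step 2: the filtered range is the concatenation of the gaps
  have hflt : (PySem.List.pyRange 0 n 1).filter (fun p => !pvGetB s p) =
      gs.flatMap (fun g => PySem.List.pyRange g.1 (g.2 + 1) 1) := by
    refine pvFilter_eq s n gs 0 le_rfl (fun g hg => (hr.1 g hg).1)
      (fun g hg => ⟨(hr.1 g hg).2.1, by have := (hr.1 g hg).2.2; omega⟩)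
      hr.2.1 hr.2.2.2.2.1 ?_
    intro i h0 h1 hf
    exact hr.2.2.2.2.2 i h0 (by omega) hf
  rw [hflt]
  -- Step 3: on gap members the scans are determined by the gap
  have hstep3 : (gs.flatMap (fun g => PySem.List.pyRange g.1 (g.2 + 1) 1)).foldl
        (pvChal s n) (-1, (-1, -1)) =
      (gs.flatMap (fun g => PySem.List.pyRange g.1 (g.2 + 1) 1)).foldl
        (fun acc p => if pvTupGt (pvDistOf gs p) acc.2 then (p, pvDistOf gs p) else acc)
        (-1, (-1, -1)) := by
    apply PySem.List.foldl_congr_mem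
    intro acc p hp
    rcases List.mem_flatMap.mp hp with ⟨g, hg, hpg⟩
    have hpg' := PySem.List.mem_pyRange_one.mp hpg
    rw [pvChal, pvScanL_eq s gs hr g hg p hpg'.1 (by omega),
        pvScanR_eq s gs n hr hn g hg p hpg'.1 (by omega),
        pvDistOf_eq gs hr.2.2.2.2.1 g hg p hpg'.1 (by omega)]
    have e1 : p - (g.1 - 1) - 1 = p - g.1 := by ring
    have e2 : g.2 + 1 - p - 1 = g.2 - p := by ring
    rw [e1, e2]
    have e3 : p - g.1 + (g.2 - p) = g.2 - g.1 := by ring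
    rw [e3]
  rw [hstep3]
  -- Step 4: view it as a first-argmax fold over candidate pairs
  have hstep4 : (gs.flatMap (fun g => PySem.List.pyRange g.1 (g.2 + 1) 1)).foldl
        (fun acc p => if pvTupGt (pvDistOf gs p) acc.2 then (p, pvDistOf gs p) else acc)
        (-1, (-1, -1)) =
      ((gs.flatMap (fun g => PySem.List.pyRange g.1 (g.2 + 1) 1)).map
        (fun p => (p, pvDistOf gs p))).foldl
        (pvArgStep (fun c : Int × (Int × Int) => toLex c.2)) (-1, (-1, -1)) := by
    rw [List.foldl_map]
    apply PySem.List.foldl_congr_mem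
    intro acc p _
    have hb := pvTupGt_iff (pvDistOf gs p) acc.2
    by_cases h : toLex acc.2 < toLex (pvDistOf gs p)
    · rw [pvArgStep, if_pos (hb.mpr h), if_pos h]
    · rw [pvArgStep, if_neg (fun hc => h (hb.mp hc)), if_neg h]
  rw [hstep4]
  -- Step 5: the constructed first-argmax certificate pins the result
  refine pvArg_unique _ _ _ _ _ (pvArg_spec _ _ _) ?_
  have hdec : gs = gs.take (pvBestIdx gs).toNat ++ pvG gs :: gs.drop ((pvBestIdx gs).toNat + 1) := by
    conv_lhs => rw [← List.take_append_drop (pvBestIdx gs).toNat gs]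
    rw [List.drop_eq_getElem_cons hjlt, hG_get]
  have hrg : PySem.List.pyRange (pvG gs).1 ((pvG gs).2 + 1) 1 =
      PySem.List.pyRange (pvG gs).1 (pvP gs) 1 ++
        pvP gs :: PySem.List.pyRange (pvP gs + 1) ((pvG gs).2 + 1) 1 := by
    rw [PySem.List.pyRange_one_append (pvG gs).1 (pvP gs) ((pvG gs).2 + 1) (by omega) (by omega),
        PySem.List.pyRange_one_cons (by omega : pvP gs < (pvG gs).2 + 1)]
  have hfp : pvDistOf gs (pvP gs) =
      (min (pvP gs - (pvG gs).1) ((pvG gs).2 - pvP gs), (pvG gs).2 - (pvG gs).1) :=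
    pvDistOf_eq gs hr.2.2.2.2.1 _ hGmem _ (by omega) (by omega)
  refine Or.inr ⟨((gs.take (pvBestIdx gs).toNat).flatMap
      (fun g => PySem.List.pyRange g.1 (g.2 + 1) 1)).map (fun p => (p, pvDistOf gs p)) ++
      (PySem.List.pyRange (pvG gs).1 (pvP gs) 1).map (fun p => (p, pvDistOf gs p)),
    (PySem.List.pyRange (pvP gs + 1) ((pvG gs).2 + 1) 1).map (fun p => (p, pvDistOf gs p)) ++
      ((gs.drop ((pvBestIdx gs).toNat + 1)).flatMap
      (fun g => PySem.List.pyRange g.1 (g.2 + 1) 1)).map (fun p => (p, pvDistOf gs p)),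
    ?_, ?_, ?_, ?_⟩
  · -- the list decomposition
    have hfmdec : gs.flatMap (fun g => PySem.List.pyRange g.1 (g.2 + 1) 1) =
        (gs.take (pvBestIdx gs).toNat).flatMap (fun g => PySem.List.pyRange g.1 (g.2 + 1) 1) ++
        PySem.List.pyRange (pvG gs).1 (pvP gs) 1 ++ pvP gs ::
        (PySem.List.pyRange (pvP gs + 1) ((pvG gs).2 + 1) 1 ++
         (gs.drop ((pvBestIdx gs).toNat + 1)).flatMap
           (fun g => PySem.List.pyRange g.1 (g.2 + 1) 1)) := by
      conv_lhs => rw [hdec]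
      rw [List.flatMap_append, List.flatMap_cons, hrg]
      simp [List.append_assoc]
    rw [hfmdec]
    simp only [List.map_append, List.map_cons, hfp, List.append_assoc]
  · -- init key is beaten
    simp only [Prod.Lex.lt_iff, ofLex_toLex]
    left
    have : (0 : Int) ≤ min (pvP gs - (pvG gs).1) ((pvG gs).2 - pvP gs) :=
      le_min (by omega) (by omega)
    omega
  · -- everything before is strictly smaller
    intro c hc
    rcases List.mem_append.mp hc with hc | hc
    · rcases List.mem_map.mp hc with ⟨p, hp, rfl⟩
      rcases List.mem_flatMap.mp hp with ⟨g', hg', hpg⟩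
      rcases List.mem_iff_getElem.mp hg' with ⟨i, hi, hgi⟩
      have hilen : i < gs.length := by
        have := hi
        simp [List.length_take] at this
        omega
      have hij : i < (pvBestIdx gs).toNat := by
        have := hi
        simp [List.length_take] at this
        omega
      have hgi' : gs[i] = g' := by
        rw [← hgi, List.getElem_take]
      have hklt : pvGapLen g' < pvGapLen (pvG gs) := by
        have h2 := hE2 (i : Int) (by omega) (by omega)
        rw [pvKeyB_nat gs i hilen, hkbest, hgi'] at h2
        exact h2
      have hg'mem : g' ∈ gs := by rw [← hgi']; exact List.getElem_mem _
      have hpg' := PySem.List.mem_pyRange_one.mp hpg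
      rw [pvDistOf_eq gs hr.2.2.2.2.1 g' hg'mem p hpg'.1 (by omega)]
      simp only [Prod.Lex.lt_iff, ofLex_toLex]
      have hbd' := hr.1 g' hg'mem
      rw [pvGapLen, pvGapLen] at hklt
      rcases min_cases (p - g'.1) (g'.2 - p) with ⟨hm, _⟩ | ⟨hm, _⟩ <;>
        rcases min_cases (pvP gs - (pvG gs).1) ((pvG gs).2 - pvP gs) with ⟨hm2, _⟩ | ⟨hm2, _⟩ <;>
        simp only [hm, hm2] <;> omega
    · rcases List.mem_map.mp hc with ⟨p, hp, rfl⟩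
      have hp' := PySem.List.mem_pyRange_one.mp hp
      rw [pvDistOf_eq gs hr.2.2.2.2.1 _ hGmem p hp'.1 (by omega)]
      simp only [Prod.Lex.lt_iff, ofLex_toLex]
      rcases min_cases (p - (pvG gs).1) ((pvG gs).2 - p) with ⟨hm, _⟩ | ⟨hm, _⟩ <;>
        rcases min_cases (pvP gs - (pvG gs).1) ((pvG gs).2 - pvP gs) with ⟨hm2, _⟩ | ⟨hm2, _⟩ <;>
        simp only [hm, hm2] <;> omega
  · -- nothing after is strictly bigger
    intro c hc
    rcases List.mem_append.mp hc with hc | hc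
    · rcases List.mem_map.mp hc with ⟨p, hp, rfl⟩
      have hp' := PySem.List.mem_pyRange_one.mp hp
      rw [pvDistOf_eq gs hr.2.2.2.2.1 _ hGmem p (by omega) (by omega)]
      simp only [Prod.Lex.lt_iff, ofLex_toLex]
      rintro (h | ⟨h1, h2⟩)
      · rcases min_cases (p - (pvG gs).1) ((pvG gs).2 - p) with ⟨hm, _⟩ | ⟨hm, _⟩ <;>
          rcases min_cases (pvP gs - (pvG gs).1) ((pvG gs).2 - pvP gs) with ⟨hm2, _⟩ | ⟨hm2, _⟩ <;>
          rw [hm, hm2] at h <;> omega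
      · omega
    · rcases List.mem_map.mp hc with ⟨p, hp, rfl⟩
      rcases List.mem_flatMap.mp hp with ⟨g', hg', hpg⟩
      rcases List.mem_iff_getElem.mp hg' with ⟨i, hi, hgi⟩
      have hilen : (pvBestIdx gs).toNat + 1 + i < gs.length := by
        have := hi
        simp [List.length_drop] at this
        omega
      have hgi' : gs[(pvBestIdx gs).toNat + 1 + i] = g' := by
        rw [← hgi, List.getElem_drop]
      have hkle : pvGapLen g' ≤ pvGapLen (pvG gs) := by
        have h2 := hE3 (((pvBestIdx gs).toNat + 1 + i : Nat) : Int) (by omega) (by omega)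
        rw [pvKeyB_nat gs _ hilen, hkbest, hgi'] at h2
        exact h2
      have hg'mem : g' ∈ gs := by rw [← hgi']; exact List.getElem_mem _
      have hpg' := PySem.List.mem_pyRange_one.mp hpg
      rw [pvDistOf_eq gs hr.2.2.2.2.1 g' hg'mem p hpg'.1 (by omega)]
      simp only [Prod.Lex.lt_iff, ofLex_toLex]
      have hbd' := hr.1 g' hg'mem
      rw [pvGapLen, pvGapLen] at hkle
      rintro (h | ⟨h1, h2⟩)
      · rcases min_cases (p - g'.1) (g'.2 - p) with ⟨hm, _⟩ | ⟨hm, _⟩ <;>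
          rcases min_cases (pvP gs - (pvG gs).1) ((pvG gs).2 - pvP gs) with ⟨hm2, _⟩ | ⟨hm2, _⟩ <;>
          rw [hm, hm2] at h <;> omega
      · omega

theorem pvUpdate (s : List Bool) (gs : List (Int × Int)) (hr : IsRuns s gs) (hne : gs ≠ []) :
    IsRuns (PySem.List.pySetD s (pvP gs) true) (pvNewGaps gs) ∧
    pvSumLen (pvNewGaps gs) = pvSumLen gs - 1 := by
  obtain ⟨hb0, hb1, _, _⟩ := pvBestIdx_spec gs hne
  have hjlt : (pvBestIdx gs).toNat < gs.length := by omega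
  have hG_get : gs[(pvBestIdx gs).toNat] = pvG gs := by
    rw [pvG, List.getD_eq_getElem?_getD, List.getElem?_eq_getElem hjlt, Option.getD_some]
  have hGmem : pvG gs ∈ gs := by rw [← hG_get]; exact List.getElem_mem _
  obtain ⟨hbd, hfalse, hleft, hright, hpw, hcov⟩ := hr
  have hGbd := hbd _ hGmem
  have hpa : (pvG gs).1 ≤ pvP gs ∧ pvP gs ≤ (pvG gs).2 := by unfold pvP; omega
  have hp0 : (0 : Int) ≤ pvP gs := by omega
  have hplen : pvP gs < (s.length : Int) := by omega
  have hpfalse : pvGetB s (pvP gs) = false := hfalse _ hGmem _ (by omega) (by omega)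
  have hget : ∀ i : Int, 0 ≤ i → pvGetB (PySem.List.pySetD s (pvP gs) true) i =
      if i = pvP gs then true else pvGetB s i :=
    fun i hi => pvGetB_set s (pvP gs) i hp0 hplen hi
  have hsetlen : (((PySem.List.pySetD s (pvP gs) true).length : Nat) : Int) = (s.length : Int) := by
    rw [PySem.List.pySetD_of_nonneg _ _ hp0]; simp
  have hpwI := List.pairwise_iff_getElem.mp hpw
  have hmemT : ∀ x ∈ gs.take (pvBestIdx gs).toNat,
      ∃ i, ∃ _ : i < gs.length, i < (pvBestIdx gs).toNat ∧ gs[i] = x := by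
    intro x hx
    rcases List.mem_iff_getElem.mp hx with ⟨i, hi, hgi⟩
    have hl : i < (pvBestIdx gs).toNat ∧ i < gs.length := by
      simp [List.length_take] at hi; omega
    exact ⟨i, hl.2, hl.1, by rw [← hgi, List.getElem_take]⟩
  have hmemD : ∀ x ∈ gs.drop ((pvBestIdx gs).toNat + 1),
      ∃ i, ∃ _ : i < gs.length, (pvBestIdx gs).toNat < i ∧ gs[i] = x := by
    intro x hx
    rcases List.mem_iff_getElem.mp hx with ⟨i, hi, hgi⟩
    have hl : (pvBestIdx gs).toNat + 1 + i < gs.length := by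
      simp [List.length_drop] at hi; omega
    exact ⟨(pvBestIdx gs).toNat + 1 + i, hl, by omega, by rw [← hgi, List.getElem_drop]⟩
  have hmemM : ∀ x ∈ pvMid gs,
      (x.1 = (pvG gs).1 ∧ x.2 = pvP gs - 1 ∧ (pvG gs).1 ≤ pvP gs - 1) ∨
      (x.1 = pvP gs + 1 ∧ x.2 = (pvG gs).2 ∧ pvP gs + 1 ≤ (pvG gs).2) := by
    intro x hx
    unfold pvMid at hx
    rcases List.mem_append.mp hx with hx | hx <;> split_ifs at hx with h <;> simp at hx
    · exact Or.inl ⟨by rw [hx], by rw [hx], h⟩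
    · exact Or.inr ⟨by rw [hx], by rw [hx], h⟩
  have hOld : ∀ i, ∀ _ : i < gs.length, i ≠ (pvBestIdx gs).toNat →
      gs[i].2 + 1 < (pvG gs).1 ∨ (pvG gs).2 + 1 < gs[i].1 := by
    intro i h hne'
    rcases Nat.lt_or_ge i (pvBestIdx gs).toNat with hlt | hge
    · left
      have := hpwI i (pvBestIdx gs).toNat h hjlt hlt
      rw [hG_get] at this
      exact this
    · right
      have hgt : (pvBestIdx gs).toNat < i := by omega
      have := hpwI (pvBestIdx gs).toNat i hjlt h hgt
      rw [hG_get] at this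
      exact this
  have hmemN : ∀ x ∈ pvNewGaps gs,
      x ∈ pvMid gs ∨ ∃ i, ∃ _ : i < gs.length, i ≠ (pvBestIdx gs).toNat ∧ gs[i] = x := by
    intro x hx
    unfold pvNewGaps at hx
    rcases List.mem_append.mp hx with hx | hx
    · rcases List.mem_append.mp hx with hx | hx
      · rcases hmemT x hx with ⟨i, h, hij, hgi⟩
        exact Or.inr ⟨i, h, by omega, hgi⟩
      · exact Or.inl hx
    · rcases hmemD x hx with ⟨i, h, hij, hgi⟩
      exact Or.inr ⟨i, h, by omega, hgi⟩
  refine ⟨⟨?_, ?_, ?_, ?_, ?_, ?_⟩, ?_⟩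
  · -- bounds
    intro g hg
    rw [hsetlen]
    rcases hmemN g hg with hm | ⟨i, h, _, hgi⟩
    · rcases hmemM g hm with ⟨h1, h2, hgr⟩ | ⟨h1, h2, hgr⟩ <;> omega
    · rw [← hgi]; exact hbd _ (List.getElem_mem h)
  · -- all seats inside a gap are empty
    intro g hg i hi1 hi2
    rcases hmemN g hg with hm | ⟨m, h, hmj, hgi⟩
    · rcases hmemM g hm with ⟨h1, h2, hgr⟩ | ⟨h1, h2, hgr⟩
      · rw [hget i (by omega), if_neg (by omega)]
        exact hfalse _ hGmem i (by omega) (by omega)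
      · rw [hget i (by omega), if_neg (by omega)]
        exact hfalse _ hGmem i (by omega) (by omega)
    · have hb' := hbd _ (List.getElem_mem h)
      have hd := hOld m h hmj
      rw [← hgi] at hi1 hi2
      rw [hget i (by omega), if_neg (by omega)]
      exact hfalse _ (List.getElem_mem h) i hi1 hi2
  · -- left boundaries are occupied
    intro g hg hpos
    rcases hmemN g hg with hm | ⟨m, h, hmj, hgi⟩
    · rcases hmemM g hm with ⟨h1, h2, hgr⟩ | ⟨h1, h2, hgr⟩
      · rw [hget _ (by omega), if_neg (by omega), h1]
        exact hleft _ hGmem (by omega)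
      · rw [hget _ (by omega), if_pos (show g.1 - 1 = pvP gs by omega)]
    · have hb' := hbd _ (List.getElem_mem h)
      rw [← hgi] at hpos ⊢
      have hbtrue := hleft _ (List.getElem_mem h) hpos
      have hne1 : gs[m].1 - 1 ≠ pvP gs := by
        intro e
        rw [e, hpfalse] at hbtrue
        exact Bool.false_ne_true hbtrue
      rw [hget _ (by omega), if_neg hne1]
      exact hbtrue
  · -- right boundaries are occupied
    intro g hg hlt2
    rw [hsetlen] at hlt2
    rcases hmemN g hg with hm | ⟨m, h, hmj, hgi⟩
    · rcases hmemM g hm with ⟨h1, h2, hgr⟩ | ⟨h1, h2, hgr⟩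
      · rw [hget _ (by omega), if_pos (show g.2 + 1 = pvP gs by omega)]
      · rw [hget _ (by omega), if_neg (by omega), h2]
        exact hright _ hGmem (by omega)
    · have hb' := hbd _ (List.getElem_mem h)
      rw [← hgi] at hlt2 ⊢
      have hbtrue := hright _ (List.getElem_mem h) (by omega)
      have hne2 : gs[m].2 + 1 ≠ pvP gs := by
        intro e
        rw [e, hpfalse] at hbtrue
        exact Bool.false_ne_true hbtrue
      rw [hget _ (by omega), if_neg hne2]
      exact hbtrue
  · -- the new gaps stay sorted and separated
    unfold pvNewGaps
    refine List.pairwise_append.mpr ⟨List.pairwise_append.mpr ⟨?_, ?_, ?_⟩, ?_, ?_⟩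
    · exact hpw.sublist (List.take_sublist _ _)
    · unfold pvMid
      split_ifs with h1 h2 <;> simp [List.pairwise_cons]
    · intro x hx y hy
      rcases hmemT x hx with ⟨i, h, hij, hgi⟩
      have hxa := hpwI i _ h hjlt hij
      rw [hG_get] at hxa
      rw [← hgi]
      rcases hmemM y hy with ⟨h1, _, _⟩ | ⟨h1, _, _⟩ <;> omega
    · exact hpw.sublist (List.drop_sublist _ _)
    · intro x hx y hy
      rcases hmemD y hy with ⟨i, h, hij, hgi⟩
      have hyg := hpwI _ i hjlt h hij
      rw [hG_get] at hyg
      rw [← hgi]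
      rcases List.mem_append.mp hx with hx | hx
      · rcases hmemT x hx with ⟨i', h', hij', hgi'⟩
        rw [← hgi']
        exact hpwI i' i h' h (by omega)
      · rcases hmemM x hx with ⟨_, h2, _⟩ | ⟨_, h2, _⟩ <;> omega
  · -- every empty seat is still covered
    intro i hi0 hilen hfal
    rw [hsetlen] at hilen
    rw [hget i hi0] at hfal
    by_cases hip : i = pvP gs
    · rw [if_pos hip] at hfal
      exact absurd hfal (by simp)
    · rw [if_neg hip] at hfal
      rcases hcov i hi0 hilen hfal with ⟨g0, hg0, hcv⟩
      rcases List.mem_iff_getElem.mp hg0 with ⟨m, hm, rfl⟩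
      by_cases hmj : m = (pvBestIdx gs).toNat
      · subst hmj
        rw [hG_get] at hcv
        rcases lt_or_gt_of_ne hip with hlt2 | hgt2
        · have hmm : ((pvG gs).1, pvP gs - 1) ∈ pvMid gs := by
            unfold pvMid
            rw [if_pos (by omega)]
            simp
          refine ⟨((pvG gs).1, pvP gs - 1), ?_, ?_, ?_⟩
          · unfold pvNewGaps
            exact List.mem_append.mpr (Or.inl (List.mem_append.mpr (Or.inr hmm)))
          · show (pvG gs).1 ≤ i; omega
          · show i ≤ pvP gs - 1; omega
        · have hmm : (pvP gs + 1, (pvG gs).2) ∈ pvMid gs := by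
            unfold pvMid
            rcases le_or_gt (pvG gs).1 (pvP gs - 1) with h1 | h1
            · rw [if_pos h1, if_pos (by omega)]; simp
            · rw [if_neg (by omega), if_pos (by omega)]; simp
          refine ⟨(pvP gs + 1, (pvG gs).2), ?_, ?_, ?_⟩
          · unfold pvNewGaps
            exact List.mem_append.mpr (Or.inl (List.mem_append.mpr (Or.inr hmm)))
          · show pvP gs + 1 ≤ i; omega
          · show i ≤ (pvG gs).2; omega
      · have hmem2 : gs[m] ∈ pvNewGaps gs := by
          unfold pvNewGaps
          rcases Nat.lt_or_ge m (pvBestIdx gs).toNat with hlt2 | hge2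
          · refine List.mem_append.mpr (Or.inl (List.mem_append.mpr (Or.inl ?_)))
            rw [List.mem_iff_getElem]
            refine ⟨m, by simp [List.length_take]; omega, ?_⟩
            rw [List.getElem_take]
          · refine List.mem_append.mpr (Or.inr ?_)
            rw [List.mem_iff_getElem]
            refine ⟨m - ((pvBestIdx gs).toNat + 1), by simp [List.length_drop]; omega, ?_⟩
            rw [List.getElem_drop]
            congr 1
            omega
        exact ⟨gs[m], hmem2, hcv⟩
  · -- the total gap length drops by one
    have hsummid : pvSumLen (pvMid gs) = (pvG gs).2 - (pvG gs).1 := by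
      unfold pvSumLen pvMid
      split_ifs with h1 h2 <;> simp <;> unfold pvP at * <;> omega
    have hdec : gs = gs.take (pvBestIdx gs).toNat ++
        pvG gs :: gs.drop ((pvBestIdx gs).toNat + 1) := by
      conv_lhs => rw [← List.take_append_drop (pvBestIdx gs).toNat gs]
      rw [List.drop_eq_getElem_cons hjlt, hG_get]
    have hdecS : pvSumLen gs = pvSumLen (gs.take (pvBestIdx gs).toNat) +
        ((pvG gs).2 - (pvG gs).1 + 1) + pvSumLen (gs.drop ((pvBestIdx gs).toNat + 1)) := by
      conv_lhs => rw [hdec]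
      unfold pvSumLen
      simp [List.map_append, List.sum_append]
      ring
    have hN : pvSumLen (pvNewGaps gs) = pvSumLen (gs.take (pvBestIdx gs).toNat) +
        pvSumLen (pvMid gs) + pvSumLen (gs.drop ((pvBestIdx gs).toNat + 1)) := by
      unfold pvNewGaps pvSumLen
      simp [List.map_append, List.sum_append]
      ring
    omega

theorem pvBStep_eq (gs : List (Int × Int)) (out : List Int) (hne : gs ≠ []) :
    pvBStep (gs, out) = (pvNewGaps gs, out ++ [pvP gs]) := by
  obtain ⟨h0, h1, _, _⟩ := pvBestIdx_spec gs hne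
  have hjlt : (pvBestIdx gs).toNat < gs.length := by omega
  have hG : PySem.List.pyGetD gs (pvBestIdx gs) (0, 0) = pvG gs := by
    rw [PySem.List.pyGetD_eq_getElem _ _ h0 h1, pvG, List.getD_eq_getElem?_getD,
        List.getElem?_eq_getElem hjlt, Option.getD_some]
  have ht1 : (pvBestIdx gs + 1).toNat = (pvBestIdx gs).toNat + 1 := by omega
  simp only [pvBStep, hG]
  rw [PySem.Int.floordiv_eq_ediv_of_pos (by norm_num)]
  rw [PySem.List.slice_to _ h0, PySem.List.slice_from _ (by omega : (0 : Int) ≤ pvBestIdx gs + 1),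
      ht1]
  simp only [pvNewGaps, pvMid, pvP]

theorem pvOuter (n : Int) (l : List Int) :
    ∀ (s : List Bool) (gs : List (Int × Int)) (out : List Int),
    IsRuns s gs → (s.length : Int) = n → pvSumLen gs = (l.length : Int) →
    (l.foldl (fun st _ => pvAStep n st) (s, out)).2 =
      (l.foldl (fun st _ => pvBStep st) (gs, out)).2 := by
  induction l with
  | nil => intro s gs out _ _ _; rfl
  | cons x t ih =>
    intro s gs out hr hn hsum
    have hne : gs ≠ [] := by
      intro e
      rw [e] at hsum
      simp [pvSumLen] at hsum
      omega
    simp only [List.foldl_cons]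
    have hA : pvAStep n (s, out) = (PySem.List.pySetD s (pvP gs) true, out ++ [pvP gs]) := by
      simp only [pvAStep]
      rw [pvInner_eq n s gs hr hne hn]
    have hB := pvBStep_eq gs out hne
    rw [hA, hB]
    refine ih _ _ _ (pvUpdate s gs hr hne).1 ?_ ?_
    · rw [PySem.List.length_pySetD]
      exact hn
    · rw [(pvUpdate s gs hr hne).2, hsum]
      simp

theorem pvBase (n : Int) (hn : 0 < n) : IsRuns (List.replicate n.toNat false) [(0, n - 1)] := by
  refine ⟨?_, ?_, ?_, ?_, ?_, ?_⟩
  · intro g hg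
    simp at hg
    subst hg
    simp
    omega
  · intro g hg i h1 h2
    simp at hg
    subst hg
    exact pvGetB_replicate n.toNat i (by simp at h1; omega) (by simp at h2; omega)
  · intro g hg hpos
    simp at hg
    subst hg
    simp at hpos
  · intro g hg h2
    simp at hg
    subst hg
    simp at h2
    omega
  · simp
  · intro i h0 h1 _
    refine ⟨(0, n - 1), by simp, ?_, ?_⟩
    · show (0 : Int) ≤ i; omega
    · show i ≤ n - 1
      simp at h1
      omega

-- ===== VERDICT (by name: the statement is the Claim_ definition above) =====
theorem bruteForceSeatingGenerator_spec : Claim_equal_bruteForceSeatingGenerator := by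
  intro n _
  unfold Spec_bruteForceSeatingGenerator bruteForceSeatingGenerator bruteForceSeatingGenerator_alt
  by_cases hn : 0 < n
  · rw [if_pos hn]
    refine pvOuter n (PySem.List.pyRange 0 n 1) (List.replicate n.toNat false) [(0, n - 1)] []
      (pvBase n hn) ?_ ?_
    · simp
      omega
    · simp [pvSumLen, PySem.List.length_pyRange_one]
      omega
  · rw [if_neg hn]
    rw [PySem.List.pyRange_one_eq_nil (by omega)]
    rfl
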